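-- pv_equiv track=rewrite | github.com/universeyoung/BoxGirder | BoxGirderPlus1.py | list_modify
-- ===== SOURCE A (Python) =====
-- def list_modify(list):
--     '''
--     集合去除相邻相同的元素
--     '''
--     index=[]
--     li=list[:]
--     for i in range(0,len(list)-1):
--         if list[i]==list[i+1]:
--             index.append(i)
--     if len(index)!=0:
--         head=list[:index[0]]
--         mid=[]
--         for i in range(0,len(index)-1):
--             mid+=list[index[i]+1:index[i+1]]
--         tail=list[index[-1]+1:]
--         li=head+mid+tail
--     return li
-- ===== SOURCE B (Python) =====
-- def list_modify(list):
--     '''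
--     集合去除相邻相同的元素
--     '''
--     return [x for x, y in zip(list, list[1:]) if x != y] + list[-1:]
-- ===== Notes on version B (the rewrite author's own statement) =====
-- stated objective: simpler
-- what changed: Replaces A's deletion-index table and head/mid/tail slice reassembly with one zip-with-successor pass that keeps each element differing from its neighbour and appends the last element.
import Mathlib
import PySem

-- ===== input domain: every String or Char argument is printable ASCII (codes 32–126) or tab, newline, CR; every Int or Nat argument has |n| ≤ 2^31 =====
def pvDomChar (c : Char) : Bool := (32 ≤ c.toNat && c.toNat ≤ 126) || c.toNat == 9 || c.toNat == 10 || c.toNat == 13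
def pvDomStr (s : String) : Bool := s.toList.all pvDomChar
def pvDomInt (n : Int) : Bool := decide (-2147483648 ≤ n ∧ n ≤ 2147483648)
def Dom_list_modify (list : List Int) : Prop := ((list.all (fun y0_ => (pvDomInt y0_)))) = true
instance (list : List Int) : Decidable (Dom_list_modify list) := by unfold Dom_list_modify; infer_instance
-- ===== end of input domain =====

-- B removes elements equal to their right neighbour in one zip-with-successor pass
-- instead of A's deletion-index table plus head/mid/tail slice reassembly (objective: simpler).

-- ===== PORT A =====
-- index = []; for i in range(0, len(list)-1): if list[i]==list[i+1]: index.append(i)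
def pvIdx (list : List Int) : List Int :=
  (PySem.List.pyRange 0 ((list.length : Int) - 1) 1).foldl
    (fun acc i =>
      if PySem.List.pyGetD list i 0 == PySem.List.pyGetD list (i + 1) 0 then acc ++ [i]
      else acc) []

-- mid = []; for i in range(0, len(index)-1): mid += list[index[i]+1:index[i+1]]
def pvMid (list index : List Int) : List Int :=
  (PySem.List.pyRange 0 ((index.length : Int) - 1) 1).foldl
    (fun acc i =>
      acc ++ PySem.List.slice list (some (PySem.List.pyGetD index i 0 + 1))
               (some (PySem.List.pyGetD index (i + 1) 0))) []

def list_modify (list : List Int) : List Int :=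
  let index := pvIdx list
  let li := PySem.List.slice list none none          -- li = list[:]
  if index.length ≠ 0 then
    PySem.List.slice list none (some (PySem.List.pyGetD index 0 0))                 -- head
      ++ pvMid list index                                                           -- mid
      ++ PySem.List.slice list (some (PySem.List.pyGetD index (-1) 0 + 1)) none     -- tail
  else li

-- ===== PORT B =====
-- return [x for x, y in zip(list, list[1:]) if x != y] + list[-1:]
def list_modify_alt (list : List Int) : List Int :=
  ((list.zip (PySem.List.slice list (some 1) none)).filter
      (fun p => !(p.1 == p.2))).map Prod.fst
    ++ PySem.List.slice list (some (-1)) none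

-- ===== PRECONDITION & SPEC =====
def Spec_list_modify (list : List Int) (out : List Int) : Prop := out = list_modify_alt list
instance (list : List Int) (out : List Int) : Decidable (Spec_list_modify list out) := by unfold Spec_list_modify; infer_instance

-- ===== CLAIM (what is proved, stated in full; the proofs are below) =====
def Claim_equal_list_modify : Prop := ∀ (list : List Int), Dom_list_modify list → Spec_list_modify list (list_modify list)

-- ===== LEMMAS AND PROOFS =====

-- Nat-index views of A's index table and of its mid reassembly loop
def natIdx (l : List Int) : List Nat :=
  (List.range (l.length - 1)).filter (fun k => l.getD k 0 == l.getD (k + 1) 0)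

def natMid (l : List Int) : List Nat → List Int
  | [] => []
  | [_] => []
  | c :: d :: rest => (l.drop (c + 1)).take (d - (c + 1)) ++ natMid l (d :: rest)

theorem castGetD (I : List Nat) (n : Nat) :
    (I.map (fun k : Nat => (k : Int))).getD n 0 = ((I.getD n 0 : Nat) : Int) := by
  induction I generalizing n with
  | nil => simp
  | cons c r ih => cases n with
    | zero => simp
    | succ m => simpa using ih m

theorem flatMap_ext {α β : Type} (f g : α → List β) (l : List α) (h : ∀ x, f x = g x) :
    l.flatMap f = l.flatMap g := by
  have : f = g := funext h
  rw [this]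

theorem pvIdx_eq (l : List Int) : pvIdx l = (natIdx l).map (fun k : Nat => (k : Int)) := by
  unfold pvIdx natIdx
  rw [PySem.List.foldl_append_if_eq_filter, PySem.List.pyRange_one]
  have h1 : (((l.length : Int) - 1) - 0).toNat = l.length - 1 := by omega
  rw [h1, List.filter_map]
  simp only [List.nil_append, zero_add]
  have hp : List.filter ((fun i => PySem.List.pyGetD l i 0 == PySem.List.pyGetD l (i + 1) 0) ∘ fun k => ((k : Nat) : Int)) (List.range (l.length - 1))
      = List.filter (fun k => l.getD k 0 == l.getD (k + 1) 0) (List.range (l.length - 1)) := by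
    apply List.filter_congr
    intro k _
    have h2 : ((k : Int) + 1) = ((k + 1 : Nat) : Int) := by omega
    simp only [Function.comp_def, h2, PySem.List.pyGetD_natCast]
  rw [hp]

theorem natFlat (l : List Int) (I : List Nat) :
    (List.range (I.length - 1)).flatMap
      (fun k => (l.drop (I.getD k 0 + 1)).take (I.getD (k + 1) 0 - (I.getD k 0 + 1)))
      = natMid l I := by
  induction I with
  | nil => rfl
  | cons c rest ih =>
    cases rest with
    | nil => rfl
    | cons d r =>
      simp only [List.length_cons, Nat.add_sub_cancel, List.range_succ_eq_map,
        List.flatMap_cons, List.flatMap_map, natMid]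
      simp only [List.length_cons, Nat.add_sub_cancel] at ih
      rw [← ih]
      simp [Nat.succ_eq_add_one]

theorem pvMid_eq (l : List Int) (I : List Nat) :
    pvMid l (I.map (fun k : Nat => (k : Int))) = natMid l I := by
  unfold pvMid
  rw [PySem.List.foldl_append_eq_flatMap, PySem.List.pyRange_one]
  have h1 : ((((I.map (fun k : Nat => (k : Int))).length : Int) - 1) - 0).toNat = I.length - 1 := by
    simp only [List.length_map]; omega
  rw [h1, List.flatMap_map, List.nil_append, ← natFlat l I]
  apply flatMap_ext
  intro k
  have e1 : (0 + (k : Int)) = ((k : Nat) : Int) := by omega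
  have e2 : ((k : Int) + 1) = (((k + 1 : Nat)) : Int) := by omega
  rw [e1, e2, PySem.List.pyGetD_natCast, PySem.List.pyGetD_natCast, castGetD, castGetD]
  have e3 : ((I.getD k 0 : Nat) : Int) + 1 = ((I.getD k 0 + 1 : Nat) : Int) := by omega
  rw [e3, PySem.List.slice_natCast]

def natLast (I : List Nat) : Nat := I.getLast?.getD 0

theorem natLast_cons_cons (c x : Nat) (xs : List Nat) :
    natLast (c :: x :: xs) = natLast (x :: xs) := by
  simp [natLast, List.getLast?_cons_cons]

theorem natLast_map_add (j : Nat) (js : List Nat) :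
    natLast ((j :: js).map (· + 1)) = natLast (j :: js) + 1 := by
  induction js generalizing j with
  | nil => rfl
  | cons x xs ih =>
    simp only [List.map_cons, natLast_cons_cons]
    simpa using ih x

-- A's result written over the Nat-index view
theorem A_nil (l : List Int) (h : natIdx l = []) : list_modify l = l := by
  have hJm : pvIdx l = [] := by rw [pvIdx_eq, h]; rfl
  simp [list_modify, hJm, PySem.List.slice_none_none]

theorem A_cons (l : List Int) (c : Nat) (rest : List Nat) (hJ : natIdx l = c :: rest) :
    list_modify l = l.take c ++ natMid l (c :: rest) ++ l.drop (natLast (c :: rest) + 1) := by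
  have hJm : pvIdx l = (c :: rest).map (fun k : Nat => (k : Int)) := by rw [pvIdx_eq, hJ]
  have hne : (c :: rest).map (fun k : Nat => (k : Int)) ≠ [] := by simp
  simp only [list_modify, hJm, List.length_map, List.length_cons, ne_eq, Nat.succ_ne_zero,
    not_false_iff, if_pos]
  rw [pvMid_eq l (c :: rest), PySem.List.pyGetD_neg_one _ _ hne, List.getLast_map]
  have hlast : (c :: rest).getLast (by simp) = natLast (c :: rest) := by
    have := List.getLast?_eq_some_getLast (l := c :: rest) (by simp)
    simp [natLast, this]
  rw [hlast]
  have e3 : ((natLast (c :: rest) : Nat) : Int) + 1 = ((natLast (c :: rest) + 1 : Nat) : Int) := by omega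
  rw [e3, PySem.List.slice_from_natCast]
  rw [show ((c :: rest).map (fun k : Nat => (k : Int)) : List Int)
      = ((c : Int) :: rest.map (fun k : Nat => (k : Int))) by simp]
  rw [PySem.List.pyGetD_zero_cons, PySem.List.slice_to_natCast]

theorem natIdx_step (a b : Int) (t : List Int) :
    natIdx (a :: b :: t) =
      (if a = b then [0] else []) ++ (natIdx (b :: t)).map (· + 1) := by
  simp only [natIdx, List.length_cons, Nat.add_sub_cancel, List.range_succ_eq_map,
    List.filter_cons, List.filter_map]
  by_cases h : a = b <;>
    simp [h, Function.comp_def, Nat.succ_eq_add_one]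

theorem natMid_shift (a : Int) (l : List Int) (I : List Nat) :
    natMid (a :: l) (I.map (· + 1)) = natMid l I := by
  induction I with
  | nil => rfl
  | cons c rest ih =>
    cases rest with
    | nil => rfl
    | cons d r =>
      simp only [List.map_cons, natMid] at *
      rw [ih]
      congr 1
      simp [List.drop_succ_cons]

theorem a_step (a b : Int) (t : List Int) :
    list_modify (a :: b :: t) =
      (if a = b then [] else [a]) ++ list_modify (b :: t) := by
  by_cases hab : a = b
  · rw [if_pos hab]
    cases hI : natIdx (b :: t) with
    | nil =>
      have hL : natIdx (a :: b :: t) = [0] := by rw [natIdx_step, hI, if_pos hab]; rfl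
      rw [A_cons _ 0 [] hL, A_nil _ hI]
      simp [natMid, natLast]
    | cons j js =>
      have hL : natIdx (a :: b :: t) = 0 :: (j :: js).map (· + 1) := by
        rw [natIdx_step, hI, if_pos hab]; rfl
      rw [A_cons _ j js hI]
      rw [show (0 : Nat) :: (j :: js).map (· + 1) = 0 :: (j + 1) :: js.map (· + 1) by simp] at hL
      rw [A_cons _ 0 ((j + 1) :: js.map (· + 1)) hL]
      have hmid : natMid (a :: b :: t) (0 :: (j + 1) :: js.map (· + 1))
          = (b :: t).take j ++ natMid (b :: t) (j :: js) := by
        show ((a :: b :: t).drop (0 + 1)).take ((j + 1) - (0 + 1)) ++ _ = _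
        rw [show ((j + 1) - (0 + 1)) = j by omega]
        simp only [List.drop_succ_cons, List.drop_zero]
        congr 1
        rw [show ((j + 1) :: js.map (· + 1) : List Nat) = (j :: js).map (· + 1) by simp]
        exact natMid_shift a (b :: t) (j :: js)
      have hlast : natLast (0 :: (j + 1) :: js.map (· + 1)) = natLast (j :: js) + 1 := by
        rw [natLast_cons_cons]
        rw [show ((j + 1) :: js.map (· + 1) : List Nat) = (j :: js).map (· + 1) by simp]
        exact natLast_map_add j js
      rw [hmid, hlast]
      simp [List.append_assoc]
  · rw [if_neg hab]
    cases hI : natIdx (b :: t) with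
    | nil =>
      have hL : natIdx (a :: b :: t) = [] := by rw [natIdx_step, hI, if_neg hab]; rfl
      rw [A_nil _ hL, A_nil _ hI]
      rfl
    | cons j js =>
      have hL : natIdx (a :: b :: t) = (j + 1) :: js.map (· + 1) := by
        rw [natIdx_step, hI, if_neg hab]; simp
      rw [A_cons _ j js hI, A_cons _ (j + 1) (js.map (· + 1)) hL]
      have hmid : natMid (a :: b :: t) ((j + 1) :: js.map (· + 1))
          = natMid (b :: t) (j :: js) := by
        rw [show ((j + 1) :: js.map (· + 1) : List Nat) = (j :: js).map (· + 1) by simp]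
        exact natMid_shift a (b :: t) (j :: js)
      have hlast : natLast ((j + 1) :: js.map (· + 1)) = natLast (j :: js) + 1 := by
        rw [show ((j + 1) :: js.map (· + 1) : List Nat) = (j :: js).map (· + 1) by simp]
        exact natLast_map_add j js
      rw [hmid, hlast]
      simp [List.take_succ_cons, List.drop_succ_cons]

theorem alt_step (a b : Int) (t : List Int) :
    list_modify_alt (a :: b :: t) =
      (if a = b then [] else [a]) ++ list_modify_alt (b :: t) := by
  simp [list_modify_alt, PySem.List.slice_from_one, PySem.List.slice_from_neg_one]
  by_cases h : a = b <;> simp [h]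

theorem main_eq (l : List Int) : list_modify l = list_modify_alt l := by
  induction l with
  | nil => rfl
  | cons a t ih =>
    cases t with
    | nil => rfl
    | cons b r => rw [a_step, alt_step, ih]

-- ===== VERDICT (by name: the statement is the Claim_ definition above) =====
theorem list_modify_spec : Claim_equal_list_modify := by
  intro l _
  unfold Spec_list_modify
  exact main_eq l
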